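-- pv_equiv track=rewrite | github.com/rwnicholas/fluffy-broccoli | collect_data_for_training/NCM.py | limitTwoWords
-- ===== SOURCE A (Python) =====
-- def limitTwoWords(string):
-- 	'''
-- 	limitTwoWords(string : str) : str
--
-- 	Limits the input to only two terms. Ex: 'Its pure example' -> 'Its pure'.
-- 	'''
-- 	countSpaces = 0
-- 	QTD_WORDS = 2
-- 	for i in range(len(string)):
-- 		if string[i] == ' ':
-- 			countSpaces+=1
-- 		if countSpaces == QTD_WORDS:
-- 			return string[:i]
-- 	return string
-- ===== SOURCE B (Python) =====
-- def limitTwoWords(string):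
--     return ' '.join(string.split(' ')[:2])
-- ===== Notes on version B (the rewrite author's own statement) =====
-- stated objective: idiomatic
-- what changed: Replaces the manual index loop that counts spaces and slices at the second one with a tokenize-and-rejoin: split on the single-space separator, keep the first two pieces, join them back with the separator.
import Mathlib
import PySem

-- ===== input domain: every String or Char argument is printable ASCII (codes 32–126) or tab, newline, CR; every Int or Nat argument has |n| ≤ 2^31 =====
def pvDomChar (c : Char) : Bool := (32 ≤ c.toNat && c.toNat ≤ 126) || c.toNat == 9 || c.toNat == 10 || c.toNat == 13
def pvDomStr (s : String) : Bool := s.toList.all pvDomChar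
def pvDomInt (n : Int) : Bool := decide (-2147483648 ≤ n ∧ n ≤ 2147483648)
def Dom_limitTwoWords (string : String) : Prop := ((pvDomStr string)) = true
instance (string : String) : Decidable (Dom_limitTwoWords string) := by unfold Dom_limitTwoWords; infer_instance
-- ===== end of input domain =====

-- B replaces A's index loop that counts spaces and slices at the second one by the
-- idiomatic ' '.join(string.split(' ')[:2]); same return value, no speed claim.

-- ===== PORT A =====
-- 'for i in range(len(string))' with an early return: structural recursion over the
-- remaining characters, tracking the index i and countSpaces exactly as A does.
def limitTwoWordsGo (cs : List Char) (rest : List Char) (i : Nat) (countSpaces : Int) : List Char :=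
  match rest with
  | [] => cs                                   -- loop ends: return string
  | c :: rs =>
    let countSpaces := if c = ' ' then countSpaces + 1 else countSpaces
    if countSpaces = 2 then PySem.List.slice cs none (some (i : Int))   -- return string[:i]
    else limitTwoWordsGo cs rs (i + 1) countSpaces

def limitTwoWords (string : String) : String :=
  String.ofList (limitTwoWordsGo string.toList string.toList 0 0)

-- ===== PORT B =====
-- ' '.join(string.split(' ')[:2])
def limitTwoWords_alt (string : String) : String :=
  String.ofList (PySem.Chars.join [' '] ((PySem.Chars.splitOn string.toList [' ']).take 2))

-- ===== PRECONDITION & SPEC =====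
def Spec_limitTwoWords (string : String) (out : String) : Prop := out = limitTwoWords_alt string
instance (string : String) (out : String) : Decidable (Spec_limitTwoWords string out) := by unfold Spec_limitTwoWords; infer_instance

-- ===== CLAIM (what is proved, stated in full; the proofs are below) =====
def Claim_equal_limitTwoWords : Prop := ∀ (string : String), Dom_limitTwoWords string → Spec_limitTwoWords string (limitTwoWords string)

-- ===== LEMMAS AND PROOFS =====

-- the common value: the characters up to (excluding) the second space; `seen` = one space already seen
def twoWordsAux : Bool → List Char → List Char
  | _, [] => []
  | seen, c :: rs => if c = ' ' then (if seen then [] else ' ' :: twoWordsAux true rs) else c :: twoWordsAux seen rs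

-- accumulator-free characterisation of PySem.Chars.splitOn on the single-space separator
def splitSpec : List Char → List Char → List (List Char)
  | [], cur => [cur.reverse]
  | c :: rs, cur => if c = ' ' then cur.reverse :: splitSpec rs [] else splitSpec rs (c :: cur)

lemma splitSpec_ne_nil : ∀ (l cur : List Char), splitSpec l cur ≠ [] := by
  intro l
  induction l with
  | nil => intro cur; simp [splitSpec]
  | cons c rs ih =>
    intro cur
    unfold splitSpec
    split_ifs
    · simp
    · exact ih _

lemma go_cons (n : Nat) (c : Char) (rs cur : List Char) (acc : List (List Char)) :
    PySem.Chars.splitOn.go [' '] (n+1) (c :: rs) cur acc =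
    (if c = ' ' then PySem.Chars.splitOn.go [' '] n rs [] (cur.reverse :: acc)
     else PySem.Chars.splitOn.go [' '] n rs (c :: cur) acc) := by
  rw [PySem.Chars.splitOn.go.eq_def]
  simp only [List.isPrefixOf, Bool.and_true, List.length_cons, List.drop_succ_cons]
  by_cases hc : c = ' '
  · simp [hc]
  · simp [hc, Ne.symm hc]

lemma go_eq_splitSpec : ∀ (fuel : Nat) (l cur : List Char) (acc : List (List Char)), l.length ≤ fuel →
    PySem.Chars.splitOn.go [' '] fuel l cur acc = acc.reverse ++ splitSpec l cur := by
  intro fuel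
  induction fuel with
  | zero =>
    intro l cur acc h
    have hl : l = [] := by cases l <;> simp_all
    subst hl
    rw [PySem.Chars.splitOn.go.eq_def]
    simp [splitSpec]
  | succ n ih =>
    intro l cur acc h
    cases l with
    | nil =>
      rw [PySem.Chars.splitOn.go.eq_def]
      simp [splitSpec]
    | cons c rs =>
      rw [go_cons]
      by_cases hc : c = ' '
      · rw [if_pos hc, ih rs [] _ (by simpa using h)]
        simp [splitSpec, hc]
      · rw [if_neg hc, ih rs (c :: cur) acc (by simpa using h)]
        simp [splitSpec, hc]

lemma take1_join : ∀ (rest cur : List Char),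
    PySem.Chars.join [' '] ((splitSpec rest cur).take 1) = cur.reverse ++ twoWordsAux true rest := by
  intro rest
  induction rest with
  | nil => intro cur; simp [splitSpec, twoWordsAux, PySem.Chars.join_singleton]
  | cons c rs ih =>
    intro cur
    by_cases hc : c = ' '
    · simp [splitSpec, twoWordsAux, hc, PySem.Chars.join_singleton]
    · rw [show splitSpec (c :: rs) cur = splitSpec rs (c :: cur) by simp [splitSpec, hc], ih]
      simp [twoWordsAux, hc]

lemma take2_join : ∀ (rest cur : List Char),
    PySem.Chars.join [' '] ((splitSpec rest cur).take 2) = cur.reverse ++ twoWordsAux false rest := by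
  intro rest
  induction rest with
  | nil => intro cur; simp [splitSpec, twoWordsAux, PySem.Chars.join_singleton]
  | cons c rs ih =>
    intro cur
    by_cases hc : c = ' '
    · cases hsp : splitSpec rs [] with
      | nil => exact absurd hsp (splitSpec_ne_nil rs [])
      | cons hpiece t =>
        have h1 := take1_join rs []
        rw [hsp] at h1
        simp [PySem.Chars.join_singleton] at h1
        simp [splitSpec, twoWordsAux, hc, hsp, PySem.Chars.join_cons_cons,
              PySem.Chars.join_singleton, h1]
    · rw [show splitSpec (c :: rs) cur = splitSpec rs (c :: cur) by simp [splitSpec, hc], ih]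
      simp [twoWordsAux, hc]

lemma aGo_spec : ∀ (rest pre : List Char) (seen : Bool),
    limitTwoWordsGo (pre ++ rest) rest pre.length (if seen then 1 else 0) = pre ++ twoWordsAux seen rest := by
  intro rest
  induction rest with
  | nil => intro pre seen; simp [limitTwoWordsGo, twoWordsAux]
  | cons c rs ih =>
    intro pre seen
    by_cases hc : c = ' '
    · cases seen
      · have h2 := ih (pre ++ [' ']) true
        simp only [List.append_assoc, List.singleton_append, List.length_append,
                   List.length_cons, List.length_nil, if_pos] at h2
        simp [limitTwoWordsGo, twoWordsAux, hc, h2]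
      · simp [limitTwoWordsGo, twoWordsAux, hc, PySem.List.slice_to_natCast]
    · have h2 := ih (pre ++ [c]) seen
      simp at h2
      cases seen <;> simp at h2 <;> simp [limitTwoWordsGo, twoWordsAux, hc, h2]

-- ===== VERDICT (by name: the statement is the Claim_ definition above) =====
theorem limitTwoWords_spec : Claim_equal_limitTwoWords := by
  intro s _
  show limitTwoWords s = limitTwoWords_alt s
  unfold limitTwoWords limitTwoWords_alt
  have hA := aGo_spec s.toList [] false
  simp only [List.nil_append, List.length_nil, Bool.false_eq_true, if_false] at hA
  have hS : PySem.Chars.splitOn s.toList [' '] = splitSpec s.toList [] := by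
    rw [PySem.Chars.splitOn, go_eq_splitSpec _ _ _ _ (Nat.le_succ _)]
    simp
  rw [hA, hS, take2_join]
  simp
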